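-- pv_equiv track=rewrite | github.com/cseblog/aoc_2024 | day4/day4.py | find_all_concatenations
-- ===== SOURCE A (Python) =====
-- def find_all_concatenations(keys):
--     all_concatenations = []
--
--     def backtrack(current, remaining):
--         if not remaining:
--             all_concatenations.append(current)
--         else:
--             for i in range(len(remaining)):
--                 backtrack(current + remaining[i], remaining[:i] + remaining[i + 1:])
--
--     backtrack('', keys)
--     return all_concatenations
-- ===== SOURCE B (Python) =====
-- def find_all_concatenations(keys):
--     states = [("", keys)]
--     for _ in range(len(keys)):
--         states = [(cur + rem[i], rem[:i] + rem[i + 1:])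
--                   for cur, rem in states
--                   for i in range(len(rem))]
--     return [cur for cur, _ in states]
-- ===== Notes on version B (the rewrite author's own statement) =====
-- stated objective: alternative
-- what changed: Replaced the depth-first recursive backtracking with a mutable result list by an iterative breadth-first expansion: a list of (prefix, remaining) states is rebuilt level by level with a comprehension, then the finished prefixes are read off.
import Mathlib
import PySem

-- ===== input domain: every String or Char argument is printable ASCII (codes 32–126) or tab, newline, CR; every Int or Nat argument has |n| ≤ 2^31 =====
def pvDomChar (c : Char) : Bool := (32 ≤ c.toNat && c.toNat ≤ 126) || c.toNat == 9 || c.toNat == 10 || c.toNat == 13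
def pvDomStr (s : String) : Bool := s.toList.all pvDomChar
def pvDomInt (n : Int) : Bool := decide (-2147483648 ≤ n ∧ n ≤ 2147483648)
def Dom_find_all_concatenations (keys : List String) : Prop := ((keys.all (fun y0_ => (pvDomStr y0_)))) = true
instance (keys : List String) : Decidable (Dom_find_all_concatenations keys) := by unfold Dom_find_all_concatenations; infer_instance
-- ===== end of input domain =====

-- B replaces A's recursive backtracking (mutable accumulator list) by an iterative
-- level-by-level expansion of (prefix, remaining) states; same output, no speed claim.

-- ===== PORT A =====
-- literal port of A's inner `backtrack`: the appends to the closure list become the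
-- returned list, `remaining[:i] + remaining[i+1:]` is take/drop
def pvBacktrack (current : String) (remaining : List String) : List String :=
  if remaining = [] then [current]
  else
    (List.range remaining.length).attach.foldl
      (fun acc i =>
        acc ++ pvBacktrack (current ++ remaining.getD i.1 "")
                           (remaining.take i.1 ++ remaining.drop (i.1 + 1)))
      []
termination_by remaining.length
decreasing_by
  have hi := List.mem_range.mp i.2
  simp only [List.length_append, List.length_take, List.length_drop]
  omega

def find_all_concatenations (keys : List String) : List String :=
  pvBacktrack "" keys

-- ===== PORT B =====
-- Source B: one level of the comprehension that rebuilds `states`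
def pvStep (states : List (String × List String)) : List (String × List String) :=
  states.flatMap (fun s =>
    (List.range s.2.length).map (fun i =>
      (s.1 ++ s.2.getD i "", s.2.take i ++ s.2.drop (i + 1))))

def find_all_concatenations_alt (keys : List String) : List String :=
  ((List.range keys.length).foldl (fun states _ => pvStep states) [("", keys)]).map Prod.fst

-- ===== PRECONDITION & SPEC =====
def Spec_find_all_concatenations (keys : List String) (out : List String) : Prop := out = find_all_concatenations_alt keys
instance (keys : List String) (out : List String) : Decidable (Spec_find_all_concatenations keys out) := by unfold Spec_find_all_concatenations; infer_instance

-- ===== CLAIM (what is proved, stated in full; the proofs are below) =====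
def Claim_equal_find_all_concatenations : Prop := ∀ (keys : List String), Dom_find_all_concatenations keys → Spec_find_all_concatenations keys (find_all_concatenations keys)

-- ===== LEMMAS AND PROOFS =====

theorem pvBacktrack_nil (c : String) : pvBacktrack c [] = [c] := by
  rw [pvBacktrack]; simp

-- unfold A's loop into a flatMap over the children produced by one pvStep level
theorem pvBacktrack_cons (c : String) (r : List String) (h : r ≠ []) :
    pvBacktrack c r
      = (pvStep [(c, r)]).flatMap (fun s => pvBacktrack s.1 s.2) := by
  rw [pvBacktrack]
  simp only [if_neg h, pvStep]
  rw [PySem.List.foldl_append_eq_flatMap]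
  simp [List.flatMap_map, List.getD]

-- foldl over range with a constant body is Function.iterate
theorem foldl_range_iterate {α : Type} (f : α → α) (n : Nat) (a : α) :
    (List.range n).foldl (fun x _ => f x) a = f^[n] a := by
  induction n generalizing a with
  | zero => simp
  | succ m ih => rw [List.range_succ, List.foldl_append, ih, Function.iterate_succ_apply']; simp

-- children of a state of remaining-length m+1 all have remaining-length m
theorem pvStep_length (states : List (String × List String)) (m : Nat)
    (h : ∀ s ∈ states, s.2.length = m + 1) :
    ∀ s ∈ pvStep states, s.2.length = m := by
  intro s hs
  simp only [pvStep, List.mem_flatMap, List.mem_map] at hs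
  obtain ⟨t, ht, i, hi, rfl⟩ := hs
  have := h t ht
  simp only [List.mem_range] at hi
  simp [List.length_take, List.length_drop]; omega

-- main invariant: m levels of B's expansion read off exactly A's backtracking results
theorem pvInvariant (m : Nat) (states : List (String × List String))
    (h : ∀ s ∈ states, s.2.length = m) :
    (pvStep^[m] states).map Prod.fst
      = states.flatMap (fun s => pvBacktrack s.1 s.2) := by
  induction m generalizing states with
  | zero =>
    simp only [Function.iterate_zero, id]
    induction states with
    | nil => simp
    | cons a l ih =>
      have ha : a.2 = [] := List.eq_nil_of_length_eq_zero (h a (by simp))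
      simp [ha, pvBacktrack_nil, ih (fun s hs => h s (by simp [hs]))]
  | succ m ih =>
    rw [Function.iterate_succ_apply, ih (pvStep states) (pvStep_length states m h)]
    induction states with
    | nil => simp [pvStep]
    | cons a l ihs =>
      have ha : a.2 ≠ [] := by
        intro hnil; have := h a (by simp); simp [hnil] at this
      have hstep : pvStep (a :: l) = pvStep [a] ++ pvStep l := by
        simp [pvStep]
      rw [hstep, List.flatMap_append,
          ihs (fun s hs => h s (by simp [hs]))]
      rw [List.flatMap_cons, pvBacktrack_cons a.1 a.2 ha]

-- ===== VERDICT (by name: the statement is the Claim_ definition above) =====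
theorem find_all_concatenations_spec : Claim_equal_find_all_concatenations := by
  intro keys _
  unfold Spec_find_all_concatenations find_all_concatenations find_all_concatenations_alt
  rw [foldl_range_iterate, pvInvariant keys.length [("", keys)] (by simp)]
  simp
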